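-- pv_equiv track=rewrite | github.com/DougLau/svgclean | svgclean/sketcher.py | int_12_0
-- ===== SOURCE A (Python) =====
-- def fixed_hex(fval):
-- 	return '0x%02X' % fval
--
-- def int_12_0(vals):
-- 	assert min(vals) > 0
-- 	assert max(vals) < 4096
-- 	bvals = []
-- 	for x, y in zip(vals[::2], vals[1::2]):
-- 		bvals.append(x & 0xFF)
-- 		bvals.append(((x >> 8) & 0x0F) | ((y & 0x0F) << 4))
-- 		bvals.append((y >> 4) & 0xFF)
-- 	return ', '.join(fixed_hex(b) for b in bvals)
-- ===== SOURCE B (Python) =====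
-- def int_12_0(vals):
--     assert min(vals) > 0
--     assert max(vals) < 4096
--     parts = []
--     it = iter(vals)
--     for x, y in zip(it, it):
--         hx = '%03X' % x
--         hy = '%03X' % y
--         parts.append('0x' + hx[1] + hx[2])
--         parts.append('0x' + hy[2] + hx[0])
--         parts.append('0x' + hy[0] + hy[1])
--     return ', '.join(parts)
-- ===== Notes on version B (the rewrite author's own statement) =====
-- stated objective: alternative
-- what changed: B never packs bytes: it formats each 12-bit value as a 3-digit hex string and builds the output by rearranging those hex digits per pair, instead of A's shift/mask/or assembly of byte values over zipped slices.
import Mathlib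
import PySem

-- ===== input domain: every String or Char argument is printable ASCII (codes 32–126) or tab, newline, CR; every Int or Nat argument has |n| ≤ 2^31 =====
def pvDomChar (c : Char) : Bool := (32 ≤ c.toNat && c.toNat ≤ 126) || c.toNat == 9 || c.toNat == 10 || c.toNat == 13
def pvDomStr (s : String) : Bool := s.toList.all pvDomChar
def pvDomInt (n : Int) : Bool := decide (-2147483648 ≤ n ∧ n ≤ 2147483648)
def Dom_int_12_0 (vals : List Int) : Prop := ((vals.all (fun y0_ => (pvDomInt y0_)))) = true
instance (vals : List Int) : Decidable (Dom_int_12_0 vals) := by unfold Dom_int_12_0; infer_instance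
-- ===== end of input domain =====

-- B works at the hex-digit level: each value becomes its 3-digit hex string and the output is
-- built by rearranging those digits per pair, instead of A's shift/mask/or byte assembly
-- over zipped slices; an alternative of the same cost.

-- ===== PORT A =====
-- '0x%02X' % fval — exact for 0 ≤ fval < 256 (the only values reached: every appended byte is masked to 8 bits)
def pvHexDigit (d : Nat) : Char := if d < 10 then Char.ofNat (48 + d) else Char.ofNat (55 + d)
def fixed_hex (fval : Int) : String :=
  String.ofList ['0', 'x', pvHexDigit (fval.toNat / 16), pvHexDigit (fval.toNat % 16)]

-- the two asserts raise outside Pre_int_12_0 (ValueError on [], AssertionError otherwise); inside Pre_ they pass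
def int_12_0 (vals : List Int) : String :=
  let evens := (PySem.List.slice? vals none none 2).getD []   -- vals[::2]
  let odds  := (PySem.List.slice? vals (some 1) none 2).getD []   -- vals[1::2]
  let bvals := (evens.zip odds).foldl
    (fun (acc : List Int) (p : Int × Int) =>
      acc ++ [PySem.Int.band p.1 255,
              PySem.Int.bor (PySem.Int.band (p.1 >>> (8:Nat)) 15) (PySem.Int.band p.2 15 <<< (4:Nat)),
              PySem.Int.band (p.2 >>> (4:Nat)) 255]) []
  PySem.Str.join ", " (bvals.map fixed_hex)

-- ===== PORT B =====
-- '%03X' % v read as its three hex-digit characters — exact for 0 ≤ v < 4096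
-- (the only values reached inside Pre_; outside Pre_ Python raised before formatting)
def pvHex3 (v : Int) : List Char :=
  [pvHexDigit (v.toNat / 256), pvHexDigit (v.toNat / 16 % 16), pvHexDigit (v.toNat % 16)]

-- zip(it, it) over one iterator = consecutive pairs, odd leftover dropped
def pvConsecPairs : List Int → List (Int × Int)
  | x :: y :: r => (x, y) :: pvConsecPairs r
  | _ => []

def int_12_0_alt (vals : List Int) : String :=
  let parts := (pvConsecPairs vals).foldl
    (fun (acc : List String) (p : Int × Int) =>
      let hx := pvHex3 p.1
      let hy := pvHex3 p.2
      acc ++ [String.ofList ['0', 'x', hx[1]!, hx[2]!],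
              String.ofList ['0', 'x', hy[2]!, hx[0]!],
              String.ofList ['0', 'x', hy[0]!, hy[1]!]]) []
  PySem.Str.join ", " parts

-- ===== PRECONDITION & SPEC =====
-- Pre_ excludes exactly the inputs where A raises: min/max(ValueError) on [], else the asserts
def Pre_int_12_0 (vals : List Int) : Prop :=
  vals ≠ [] ∧ ∀ v ∈ vals, 0 < v ∧ v < 4096
instance (vals : List Int) : Decidable (Pre_int_12_0 vals) := by unfold Pre_int_12_0; infer_instance
def pvWitness_int_12_0 : List Int := [1, 4095, 7]

def Spec_int_12_0 (vals : List Int) (out : String) : Prop := out = int_12_0_alt vals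
instance (vals : List Int) (out : String) : Decidable (Spec_int_12_0 vals out) := by unfold Spec_int_12_0; infer_instance

-- ===== CLAIM (what is proved, stated in full; the proofs are below) =====
def Claim_equal_int_12_0 : Prop := ∀ (vals : List Int), Dom_int_12_0 vals → Pre_int_12_0 vals → Spec_int_12_0 vals (int_12_0 vals)

-- ===== LEMMAS AND PROOFS =====

theorem pvPairs_length : ∀ (xs : List Int), (pvConsecPairs xs).length = xs.length / 2
  | [] => by simp [pvConsecPairs]
  | [_] => by simp [pvConsecPairs]
  | x :: y :: r => by
      simp [pvConsecPairs, pvPairs_length r]; omega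

theorem pvPairs_getElem : ∀ (xs : List Int) (i : Nat) (h : i < (pvConsecPairs xs).length),
    (pvConsecPairs xs)[i] = (xs.getD (2*i) 0, xs.getD (2*i+1) 0)
  | x :: y :: r, 0, h => by simp [pvConsecPairs]
  | x :: y :: r, i+1, h => by
      have := pvPairs_getElem r i (by simpa [pvConsecPairs] using h)
      simp [pvConsecPairs, this]
      constructor <;> congr 1 <;> omega

theorem pvPairs_mem : ∀ (xs : List Int) (p : Int × Int), p ∈ pvConsecPairs xs → p.1 ∈ xs ∧ p.2 ∈ xs
  | x :: y :: r, p, hp => by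
      rcases (by simpa [pvConsecPairs] using hp) with h | h
      · simp [h]
      · have := pvPairs_mem r p h
        simp [this.1, this.2]

theorem pvFilterMap_eq_map {α β : Type} (l : List α) (g : α → Option β) (h : α → β)
    (hall : ∀ a ∈ l, g a = some (h a)) : l.filterMap g = l.map h := by
  induction l with
  | nil => rfl
  | cons a l ih =>
      simp [hall a (by simp), ih (fun b hb => hall b (by simp [hb]))]

theorem pvSliceEvens (xs : List Int) :
    (PySem.List.slice? xs none none 2).getD [] =
      (List.range ((xs.length + 1) / 2)).map (fun k => xs.getD (2*k) 0) := by
  simp only [PySem.List.slice?, PySem.List.sliceIndices]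
  norm_num
  have hcnt : (if 0 < xs.length then (((xs.length:Int) + 2 - 1) / 2).toNat else 0) = (xs.length + 1) / 2 := by
    split <;> omega
  rw [hcnt]
  apply pvFilterMap_eq_map
  intro k hk
  simp only [List.mem_range] at hk
  have h2 : (2*(k:Int)).toNat = 2*k := by omega
  have hlt : 2*k < xs.length := by omega
  simp [h2, List.getElem?_eq_getElem hlt]

theorem pvSliceOdds (xs : List Int) :
    (PySem.List.slice? xs (some 1) none 2).getD [] =
      (List.range (xs.length / 2)).map (fun k => xs.getD (2*k+1) 0) := by
  simp only [PySem.List.slice?, PySem.List.sliceIndices]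
  norm_num
  have hcnt : (if 1 < xs.length then (((xs.length:Int) - min 1 (xs.length:Int) + 2 - 1) / 2).toNat else 0) = xs.length / 2 := by
    split <;> omega
  rw [hcnt]
  apply pvFilterMap_eq_map
  intro k hk
  simp only [List.mem_range] at hk
  have h2 : (min 1 (xs.length:Int) + 2*(k:Int)).toNat = 2*k+1 := by omega
  have hlt : 2*k+1 < xs.length := by omega
  simp [h2, List.getElem?_eq_getElem hlt]

theorem pvZip_eq_pairs (xs : List Int) :
    (((PySem.List.slice? xs none none 2).getD []).zip
      ((PySem.List.slice? xs (some 1) none 2).getD [])) = pvConsecPairs xs := by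
  rw [pvSliceEvens, pvSliceOdds]
  apply List.ext_getElem
  · simp [pvPairs_length]; omega
  · intro i h1 h2
    rw [pvPairs_getElem xs i h2]
    simp only [List.length_zip, List.length_map, List.length_range] at h1
    rw [List.getElem_zip]
    simp [List.getElem_map, List.getElem_range]

theorem pvBand255 (a : Int) (ha : 0 ≤ a) : PySem.Int.band a 255 = a % 256 := by
  rw [PySem.Int.band_of_nonneg ha (by norm_num)]
  have : a.toNat &&& (255:Int).toNat = a.toNat % 256 := Nat.and_two_pow_sub_one_eq_mod a.toNat 8
  rw [this]
  omega

theorem pvBand15 (a : Int) (ha : 0 ≤ a) : PySem.Int.band a 15 = a % 16 := by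
  rw [PySem.Int.band_of_nonneg ha (by norm_num)]
  have : a.toNat &&& (15:Int).toNat = a.toNat % 16 := Nat.and_two_pow_sub_one_eq_mod a.toNat 4
  rw [this]
  omega

theorem pvBorNibbles (a c : Int) (ha : 0 ≤ a) (ha' : a < 16) (hc : 0 ≤ c) (hc' : c < 16) :
    PySem.Int.bor a (c <<< (4:Nat)) = a + 16 * c := by
  rw [Int.shiftLeft_eq]
  have h16 : (0:Int) ≤ c * 2^4 := by positivity
  rw [PySem.Int.bor_of_nonneg ha h16]
  have hnat : ∀ m ∈ List.range 16, ∀ n ∈ List.range 16, m ||| (n * 16) = m + 16 * n := by decide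
  have := hnat a.toNat (by simp; omega) c.toNat (by simp; omega)
  have hto : (c * 2^4).toNat = c.toNat * 16 := by omega
  rw [hto, this]
  omega

-- per pair: A's three masked bytes rendered by fixed_hex = B's three digit-rearranged strings
theorem pvPairStrings (x y : Int) (hx : 0 < x) (hx' : x < 4096) (hy : 0 < y) (hy' : y < 4096) :
    ([PySem.Int.band x 255,
      PySem.Int.bor (PySem.Int.band (x >>> (8:Nat)) 15) (PySem.Int.band y 15 <<< (4:Nat)),
      PySem.Int.band (y >>> (4:Nat)) 255].map fixed_hex) =
    [String.ofList ['0', 'x', (pvHex3 x)[1]!, (pvHex3 x)[2]!],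
     String.ofList ['0', 'x', (pvHex3 y)[2]!, (pvHex3 x)[0]!],
     String.ofList ['0', 'x', (pvHex3 y)[0]!, (pvHex3 y)[1]!]] := by
  have hx8 : x >>> (8:Nat) = x / 256 := by rw [Int.shiftRight_eq_div_pow]; norm_num
  have hy4 : y >>> (4:Nat) = y / 16 := by rw [Int.shiftRight_eq_div_pow]; norm_num
  rw [hx8, hy4, pvBand255 _ (by omega), pvBand255 _ (by omega),
      pvBand15 _ (by omega), pvBand15 _ (by omega),
      pvBorNibbles _ _ (by omega) (by omega) (by omega) (by omega)]
  have e1 : (x % 256).toNat / 16 = x.toNat / 16 % 16 := by omega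
  have e2 : (x % 256).toNat % 16 = x.toNat % 16 := by omega
  have e3 : (x / 256 % 16 + 16 * (y % 16)).toNat / 16 = y.toNat % 16 := by omega
  have e4 : (x / 256 % 16 + 16 * (y % 16)).toNat % 16 = x.toNat / 256 := by omega
  have e5 : (y / 16 % 256).toNat / 16 = y.toNat / 256 := by omega
  have e6 : (y / 16 % 256).toNat % 16 = y.toNat / 16 % 16 := by omega
  simp only [List.map, fixed_hex, pvHex3, List.getElem!_cons_zero, List.getElem!_cons_succ,
    e1, e2, e3, e4, e5, e6]

theorem pvMain (vals : List Int) (hpre : Pre_int_12_0 vals) :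
    int_12_0 vals = int_12_0_alt vals := by
  rcases hpre with ⟨-, hbound⟩
  simp only [int_12_0, int_12_0_alt]
  rw [pvZip_eq_pairs, PySem.List.foldl_append_eq_flatMap, PySem.List.foldl_append_eq_flatMap]
  simp only [List.nil_append, List.map_flatMap]
  congr 1
  apply List.flatMap_congr
  intro p hp
  have hm := pvPairs_mem vals p hp
  have h1 := hbound p.1 hm.1
  have h2 := hbound p.2 hm.2
  exact pvPairStrings p.1 p.2 h1.1 h1.2 h2.1 h2.2

-- ===== VERDICT (by name: the statement is the Claim_ definition above) =====
theorem int_12_0_spec : Claim_equal_int_12_0 := by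
  intro vals _ hpre
  unfold Spec_int_12_0
  exact pvMain vals hpre
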